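-- pv_equiv track=rewrite | github.com/ayeshajahangir280-sudo/backend- | core/serializers.py | get_public_image
-- ===== SOURCE A (Python) =====
-- def is_inline_image(value):
--     return isinstance(value, str) and value.strip().lower().startswith('data:')
--
-- def normalize_image_references(values):
--     normalized_values = []
--     for value in values or []:
--         normalized_value = str(value or '').strip()
--         if normalized_value and normalized_value not in normalized_values:
--             normalized_values.append(normalized_value)
--     return normalized_values
--
-- def get_public_image(primary_image, image_list):
--     primary_image = str(primary_image or '').strip()
--     image_list = normalize_image_references(image_list)
--
--     if primary_image and not is_inline_image(primary_image):
--         return primary_image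
--
--     for image in image_list:
--         if image and not is_inline_image(image):
--             return image
--
--     if primary_image:
--         return primary_image
--
--     for image in image_list:
--         if image:
--             return image
--     return ''
-- ===== SOURCE B (Python) =====
-- def is_inline_image(value):
--     return isinstance(value, str) and value.strip().lower().startswith('data:')
--
-- def get_public_image(primary_image, image_list):
--     # One ordered candidate sequence: stripped primary first, then the stripped,
--     # non-empty list entries; first non-inline candidate wins, else first candidate.
--     primary = str(primary_image or '').strip()
--     candidates = [primary] if primary else []
--     candidates += [s for s in (str(v or '').strip() for v in (image_list or [])) if s]
--     for c in candidates:
--         if not is_inline_image(c):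
--             return c
--     return candidates[0] if candidates else ''
-- ===== Notes on version B (the rewrite author's own statement) =====
-- stated objective: simpler
-- what changed: Replaces A's four guarded branches plus a separate quadratic dedup pass with one ordered candidate list (stripped primary + stripped non-empty entries, no dedup needed since dedup cannot change the first match) scanned for the first non-inline image with first-candidate fallback.
import Mathlib
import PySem

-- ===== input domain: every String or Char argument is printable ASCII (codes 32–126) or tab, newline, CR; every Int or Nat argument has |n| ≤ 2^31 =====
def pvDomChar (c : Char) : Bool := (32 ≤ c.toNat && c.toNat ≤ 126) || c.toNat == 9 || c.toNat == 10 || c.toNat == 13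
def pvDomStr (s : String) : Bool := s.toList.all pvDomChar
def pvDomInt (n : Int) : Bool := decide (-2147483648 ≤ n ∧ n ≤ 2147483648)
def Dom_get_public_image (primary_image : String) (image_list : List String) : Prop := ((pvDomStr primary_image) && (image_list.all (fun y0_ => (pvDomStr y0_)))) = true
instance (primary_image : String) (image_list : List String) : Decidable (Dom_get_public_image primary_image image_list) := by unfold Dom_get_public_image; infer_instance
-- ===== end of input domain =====

-- B replaces A's four guarded branches + dedup pass with one ordered candidate list
-- scanned for the first non-inline entry, with first-candidate fallback (objective: simpler).

-- ===== PORT A =====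
def is_inline_image (value : String) : Bool :=
  PySem.Str.startswith (PySem.Str.lower (PySem.Str.strip value)) "data:"

def normalize_image_references (values : List String) : List String :=
  values.foldl (fun acc v =>
    let n := PySem.Str.strip v
    if n != "" && !acc.contains n then acc ++ [n] else acc) []

def get_public_image (primary_image : String) (image_list : List String) : String :=
  let p := PySem.Str.strip primary_image
  let il := normalize_image_references image_list
  if p != "" && !is_inline_image p then p
  else
    match il.find? (fun i => i != "" && !is_inline_image i) with
    | some i => i
    | none =>
      if p != "" then p
      else
        match il.find? (fun i => i != "") with
        | some i => i
        | none => ""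

-- ===== PORT B =====
-- Source B defines is_inline_image identically; the port reuses the helper above.
def get_public_image_alt (primary_image : String) (image_list : List String) : String :=
  let p := PySem.Str.strip primary_image
  let cands := (if p != "" then [p] else []) ++
    ((image_list.map PySem.Str.strip).filter (fun s => s != ""))
  match cands.find? (fun c => !is_inline_image c) with
  | some c => c
  | none => cands.headD ""

-- ===== PRECONDITION & SPEC =====
def Spec_get_public_image (primary_image : String) (image_list : List String) (out : String) : Prop := out = get_public_image_alt primary_image image_list
instance (primary_image : String) (image_list : List String) (out : String) : Decidable (Spec_get_public_image primary_image image_list out) := by unfold Spec_get_public_image; infer_instance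

-- ===== CLAIM (what is proved, stated in full; the proofs are below) =====
def Claim_equal_get_public_image : Prop := ∀ (primary_image : String) (image_list : List String), Dom_get_public_image primary_image image_list → Spec_get_public_image primary_image image_list (get_public_image primary_image image_list)

-- ===== LEMMAS AND PROOFS =====

-- find? over the dedup fold equals find? over the acc, then over the plain filtered list
theorem find?_normalize_aux (q : String → Bool) (values acc : List String) :
    ((values.foldl (fun acc v =>
        let n := PySem.Str.strip v
        if n != "" && !acc.contains n then acc ++ [n] else acc) acc).find? q)
      = (acc.find? q).or
          (((values.map PySem.Str.strip).filter (fun s => s != "")).find? q) := by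
  induction values generalizing acc with
  | nil => simp
  | cons v vs ih =>
    simp only [List.foldl_cons, List.map_cons]
    by_cases hne : PySem.Str.strip v = ""
    · have h0 : (PySem.Str.strip v != "" && !acc.contains (PySem.Str.strip v)) = false := by
        simp [hne]
      rw [h0]
      simp only [Bool.false_eq_true, if_false, ih]
      have hfilt : ((PySem.Str.strip v :: vs.map PySem.Str.strip).filter (fun s => s != ""))
          = (vs.map PySem.Str.strip).filter (fun s => s != "") := by
        rw [List.filter_cons]
        simp [hne]
      rw [hfilt]
    · have hfilt : ((PySem.Str.strip v :: vs.map PySem.Str.strip).filter (fun s => s != ""))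
          = PySem.Str.strip v :: ((vs.map PySem.Str.strip).filter (fun s => s != "")) := by
        rw [List.filter_cons]
        simp [hne]
      by_cases hc : acc.contains (PySem.Str.strip v) = true
      · have hnot : (PySem.Str.strip v != "" && !acc.contains (PySem.Str.strip v)) = false := by
          rw [hc]; simp
        rw [hnot]
        simp only [Bool.false_eq_true, if_false, ih]
        rw [hfilt]
        by_cases hq : q (PySem.Str.strip v)
        · obtain ⟨a, ha⟩ : ∃ a, acc.find? q = some a := by
            have hmem : PySem.Str.strip v ∈ acc := by simpa using hc
            exact Option.isSome_iff_exists.mp (List.find?_isSome.mpr ⟨_, hmem, hq⟩)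
          simp [ha, hq]
        · simp [hq]
      · have hcf : acc.contains (PySem.Str.strip v) = false := by
          simpa using hc
        have hyes : (PySem.Str.strip v != "" && !acc.contains (PySem.Str.strip v)) = true := by
          rw [hcf]; simp [hne]
        rw [hyes]
        simp only [if_true, ih]
        rw [hfilt, List.find?_append, Option.or_assoc]
        congr 1
        by_cases hq : q (PySem.Str.strip v) <;> simp [hq]

theorem find?_normalize (q : String → Bool) (values : List String) :
    (normalize_image_references values).find? q
      = ((values.map PySem.Str.strip).filter (fun s => s != "")).find? q := by
  have h := find?_normalize_aux q values []
  simpa [normalize_image_references] using h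

-- on a list of non-empty strings, A's guarded scans collapse to B's plain scans
theorem find?_noninline_of_all (l : List String)
    (h : ∀ x ∈ l, (x != "") = true) :
    l.find? (fun i => i != "" && !is_inline_image i) = l.find? (fun c => !is_inline_image c) := by
  induction l with
  | nil => simp
  | cons x xs ih =>
    have hx : (x != "") = true := h x (by simp)
    simp only [List.find?_cons, hx, Bool.true_and]
    cases hq : is_inline_image x
    · simp
    · simp only [Bool.not_true]
      exact ih (fun y hy => h y (by simp [hy]))

theorem find?_nonempty_of_all (l : List String)
    (h : ∀ x ∈ l, (x != "") = true) :
    l.find? (fun i => i != "") = l.head? := by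
  cases l with
  | nil => rfl
  | cons x xs =>
    simp only [List.find?_cons, h x (by simp), List.head?_cons]

-- ===== VERDICT (by name: the statement is the Claim_ definition above) =====
theorem get_public_image_spec : Claim_equal_get_public_image := by
  intro primary_image image_list _
  unfold Spec_get_public_image
  have hall : ∀ x ∈ List.filter (fun s => s != "") (List.map PySem.Str.strip image_list),
      (x != "") = true := fun x hx => (List.mem_filter.mp hx).2
  simp only [get_public_image, get_public_image_alt, find?_normalize,
    find?_noninline_of_all _ hall, find?_nonempty_of_all _ hall]
  generalize PySem.Str.strip primary_image = p
  generalize List.filter (fun s => s != "") (List.map PySem.Str.strip image_list) = fl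
  by_cases hpe : p = ""
  · subst hpe
    simp only [show ("" != "") = false from rfl, Bool.false_and, Bool.false_eq_true,
      if_false, List.nil_append]
    cases hf : fl.find? (fun c => !is_inline_image c) with
    | some c => simp
    | none => cases fl <;> simp
  · have hpne : (p != "") = true := by simp [hpe]
    simp only [hpne, Bool.true_and, if_true, List.cons_append, List.nil_append,
      List.find?_cons]
    by_cases hinl : is_inline_image p
    · simp only [hinl, Bool.not_true, Bool.false_eq_true, if_false]
      cases hf : fl.find? (fun c => !is_inline_image c) with
      | some c => simp
      | none => simp
    · simp [hinl]
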